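-- pv_equiv track=rewrite | github.com/spateria/FedART | fedart_supervised_learning/src/FedART/base/ARTfunc.py | listAttVal
-- ===== SOURCE A (Python) =====
-- def listAttVal(dlist, attr):
-- 	rlist = []
-- 	for i in range(len(dlist)):
-- 		if attr in dlist[i]:
-- 			rlist.append(dlist[i][attr])
-- 		else:
-- 			return []
-- 	return rlist
-- ===== SOURCE B (Python) =====
-- def listAttVal(dlist, attr):
--     if all(attr in d for d in dlist):
--         return [d[attr] for d in dlist]
--     return []
-- ===== Notes on version B (the rewrite author's own statement) =====
-- stated objective: idiomatic
-- what changed: Replaced the fused index loop with appends and mid-loop early return by two separate passes: an all() membership guard, then a comprehension building the result.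
import Mathlib
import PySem

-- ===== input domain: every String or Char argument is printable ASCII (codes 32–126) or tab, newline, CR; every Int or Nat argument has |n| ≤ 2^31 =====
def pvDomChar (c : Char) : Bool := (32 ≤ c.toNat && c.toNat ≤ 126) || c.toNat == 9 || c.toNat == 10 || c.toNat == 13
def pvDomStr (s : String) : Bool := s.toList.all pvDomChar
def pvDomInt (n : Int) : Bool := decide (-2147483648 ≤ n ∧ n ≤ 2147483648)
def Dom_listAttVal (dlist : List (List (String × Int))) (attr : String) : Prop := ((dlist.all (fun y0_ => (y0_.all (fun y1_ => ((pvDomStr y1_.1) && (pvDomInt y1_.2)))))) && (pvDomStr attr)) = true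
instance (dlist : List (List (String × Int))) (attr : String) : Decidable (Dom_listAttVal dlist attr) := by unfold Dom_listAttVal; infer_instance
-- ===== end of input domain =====

-- B replaces A's fused loop-with-early-return by two passes (an all-membership guard, then a map); objective: idiomatic.


-- ===== PORT A =====
-- A's loop over i in range(len(dlist)): append dlist[i][attr] to rlist, or return [] as soon as one dict lacks attr.
def listAttValLoop (rest : List (List (String × Int))) (attr : String) (rlist : List Int) : List Int :=
  match rest with
  | [] => rlist
  | d :: rest' =>
    match (PySem.Dict.mk d).get? attr with
    | some v => listAttValLoop rest' attr (rlist ++ [v])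
    | none => []

def listAttVal (dlist : List (List (String × Int))) (attr : String) : List Int :=
  listAttValLoop dlist attr []

-- ===== PORT B =====
-- guard pass 'all(attr in d for d in dlist)', then build pass '[d[attr] for d in dlist]' (lookup exact under the guard).
def listAttVal_alt (dlist : List (List (String × Int))) (attr : String) : List Int :=
  if dlist.all (fun d => (PySem.Dict.mk d).contains attr) then
    dlist.map (fun d => ((PySem.Dict.mk d).get? attr).getD 0)
  else []

-- ===== PRECONDITION & SPEC =====
def Spec_listAttVal (dlist : List (List (String × Int))) (attr : String) (out : List Int) : Prop := out = listAttVal_alt dlist attr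
instance (dlist : List (List (String × Int))) (attr : String) (out : List Int) : Decidable (Spec_listAttVal dlist attr out) := by unfold Spec_listAttVal; infer_instance

-- ===== CLAIM (what is proved, stated in full; the proofs are below) =====
def Claim_equal_listAttVal : Prop := ∀ (dlist : List (List (String × Int))) (attr : String), Dom_listAttVal dlist attr → Spec_listAttVal dlist attr (listAttVal dlist attr)

-- ===== LEMMAS AND PROOFS =====
theorem listAttValLoop_char (rest : List (List (String × Int))) (attr : String) (acc : List Int) :
    listAttValLoop rest attr acc =
      if rest.all (fun d => (PySem.Dict.mk d).contains attr) then
        acc ++ rest.map (fun d => ((PySem.Dict.mk d).get? attr).getD 0)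
      else [] := by
  induction rest generalizing acc with
  | nil => simp [listAttValLoop]
  | cons d rest' ih =>
    simp only [listAttValLoop, List.all_cons, List.map_cons]
    cases h : (PySem.Dict.mk d).get? attr with
    | none =>
      have : (PySem.Dict.mk d).contains attr = false := by
        simp [PySem.Dict.contains_eq_isSome_get?, h]
      simp [this]
    | some v =>
      have hc : (PySem.Dict.mk d).contains attr = true := by
        simp [PySem.Dict.contains_eq_isSome_get?, h]
      show listAttValLoop rest' attr (acc ++ [v]) = _
      rw [ih]
      simp only [hc, Bool.true_and]
      split <;> simp

-- ===== VERDICT (by name: the statement is the Claim_ definition above) =====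
theorem listAttVal_spec : Claim_equal_listAttVal := by
  intro dlist attr _
  unfold Spec_listAttVal listAttVal listAttVal_alt
  rw [listAttValLoop_char]
  simp
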